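-- pv_equiv track=rewrite | github.com/hyunmin625/pepper_smartfarm_plan_v2 | state-estimator/state_estimator/features.py | _collapse_quality_flags
-- ===== SOURCE A (Python) =====
-- from typing import Any
--
-- UNTRUSTED_SENSOR_FLAGS = {
--     "bad",
--     "blocked",
--     "stale",
--     "missing",
--     "flatline",
--     "communication_loss",
--     "calibration_due",
--     "calibration_error",
--     "readback_mismatch",
--     "unknown_state",
-- }
--
-- SUSPECT_SENSOR_FLAGS = {
--     "partial",
--     "degraded",
--     "jump",
--     "reboot_recovery",
--     "readback_warning",
-- }
--
-- def _normalize_quality_flag(raw_value: Any) -> str: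
--     text = str(raw_value or "").strip().lower()
--     if not text:
--         return "missing"
--     if text in UNTRUSTED_SENSOR_FLAGS:
--         return "bad"
--     if text in SUSPECT_SENSOR_FLAGS:
--         return "suspect"
--     return "good"
--
-- def _collapse_quality_flags(flags: list[str]) -> str:
--     normalized = [_normalize_quality_flag(flag) for flag in flags]
--     if "bad" in normalized:
--         return "bad"
--     if "suspect" in normalized:
--         return "partial"
--     if "missing" in normalized:
--         return "missing"
--     return "good"
-- ===== SOURCE B (Python) =====
-- UNTRUSTED_SENSOR_FLAGS = {
--     "bad",
--     "blocked",
--     "stale",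
--     "missing",
--     "flatline",
--     "communication_loss",
--     "calibration_due",
--     "calibration_error",
--     "readback_mismatch",
--     "unknown_state",
-- }
--
-- SUSPECT_SENSOR_FLAGS = {
--     "partial",
--     "degraded",
--     "jump",
--     "reboot_recovery",
--     "readback_warning",
-- }
--
--
-- def _rank_of(flag) -> int:
--     """Severity rank of one raw flag, with no intermediate label string:
--     3 = untrusted, 2 = suspect, 1 = empty/blank, 0 = good."""
--     text = str(flag or "").strip().lower()
--     if not text:
--         return 1
--     if text in UNTRUSTED_SENSOR_FLAGS:
--         return 3
--     if text in SUSPECT_SENSOR_FLAGS: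
--         return 2
--     return 0
--
--
-- def _label_of(rank: int) -> str:
--     if rank == 3:
--         return "bad"
--     if rank == 2:
--         return "partial"
--     if rank == 1:
--         return "missing"
--     return "good"
--
--
-- def _collapse_quality_flags(flags: list) -> str:
--     best = 0
--     for flag in flags:
--         r = _rank_of(flag)
--         if r > best:
--             best = r
--     return _label_of(best)
-- ===== Notes on version B (the rewrite author's own statement) =====
-- stated objective: alternative
-- what changed: Instead of building a list of normalized label strings and doing three sequential membership scans, B maps each raw flag straight to an integer severity rank, keeps the running maximum in one pass, and converts the final rank back to a label; no intermediate list or label strings are created.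
import Mathlib
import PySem

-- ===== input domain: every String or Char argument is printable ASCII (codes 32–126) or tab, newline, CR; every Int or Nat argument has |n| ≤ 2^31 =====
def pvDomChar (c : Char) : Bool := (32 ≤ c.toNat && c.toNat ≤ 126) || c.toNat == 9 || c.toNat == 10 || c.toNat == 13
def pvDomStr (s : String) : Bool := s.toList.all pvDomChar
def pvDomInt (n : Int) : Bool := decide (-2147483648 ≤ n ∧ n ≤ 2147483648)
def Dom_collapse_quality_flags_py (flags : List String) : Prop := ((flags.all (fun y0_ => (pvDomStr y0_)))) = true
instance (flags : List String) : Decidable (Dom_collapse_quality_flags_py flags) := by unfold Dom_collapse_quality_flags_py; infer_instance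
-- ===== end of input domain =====

-- B maps each raw flag straight to an integer severity rank and keeps the running
-- maximum in one pass, instead of building a list of label strings and doing three
-- membership scans (objective: alternative decomposition, same cost).

-- ===== PORT A =====
def untrustedSensorFlags : PySem.Set String := PySem.Set.ofList
  ["bad", "blocked", "stale", "missing", "flatline", "communication_loss",
   "calibration_due", "calibration_error", "readback_mismatch", "unknown_state"]

def suspectSensorFlags : PySem.Set String := PySem.Set.ofList
  ["partial", "degraded", "jump", "reboot_recovery", "readback_warning"]

-- _normalize_quality_flag; on String input 'raw_value or ""' is
-- 'if raw_value == "" then "" else raw_value', and str() of a str is itself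
def normalize_quality_flag (raw_value : String) : String :=
  let text := PySem.Str.lower (PySem.Str.strip (if raw_value == "" then "" else raw_value))
  if text == "" then "missing"
  else if PySem.Set.contains untrustedSensorFlags text then "bad"
  else if PySem.Set.contains suspectSensorFlags text then "suspect"
  else "good"

def collapse_quality_flags_py (flags : List String) : String :=
  let normalized := flags.map normalize_quality_flag
  if normalized.contains "bad" then "bad"
  else if normalized.contains "suspect" then "partial"
  else if normalized.contains "missing" then "missing"
  else "good"

-- ===== PORT B =====
-- _rank_of: raw flag → integer severity rank, no intermediate label string
def rank_of (flag : String) : Int :=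
  let text := PySem.Str.lower (PySem.Str.strip (if flag == "" then "" else flag))
  if text == "" then 1
  else if PySem.Set.contains untrustedSensorFlags text then 3
  else if PySem.Set.contains suspectSensorFlags text then 2
  else 0

-- _label_of
def label_of (rank : Int) : String :=
  if rank == 3 then "bad"
  else if rank == 2 then "partial"
  else if rank == 1 then "missing"
  else "good"

def collapse_quality_flags_py_alt (flags : List String) : String :=
  let best := flags.foldl (fun best flag => let r := rank_of flag; if r > best then r else best) 0
  label_of best

-- ===== PRECONDITION & SPEC =====
def Spec_collapse_quality_flags_py (flags : List String) (out : String) : Prop := out = collapse_quality_flags_py_alt flags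
instance (flags : List String) (out : String) : Decidable (Spec_collapse_quality_flags_py flags out) := by unfold Spec_collapse_quality_flags_py; infer_instance

-- ===== CLAIM (what is proved, stated in full; the proofs are below) =====
def Claim_equal_collapse_quality_flags_py : Prop := ∀ (flags : List String), Dom_collapse_quality_flags_py flags → Spec_collapse_quality_flags_py flags (collapse_quality_flags_py flags)

-- ===== LEMMAS AND PROOFS =====

-- B's rank of a flag, expressed through A's normalized label
theorem rank_of_eq_normalize (f : String) :
    rank_of f = (if normalize_quality_flag f = "bad" then 3
                 else if normalize_quality_flag f = "suspect" then 2
                 else if normalize_quality_flag f = "missing" then 1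
                 else (0 : Int)) := by
  unfold rank_of normalize_quality_flag
  generalize PySem.Str.lower (PySem.Str.strip (if f == "" then "" else f)) = t
  by_cases h1 : (t == "") = true
  · simp [h1]
  · by_cases h2 : t ∈ untrustedSensorFlags
    · simp [h1, h2]
    · by_cases h3 : t ∈ suspectSensorFlags <;> simp [h1, h2, h3]

-- normalize always returns one of the four canonical labels
theorem normalize_cases (f : String) :
    normalize_quality_flag f = "missing" ∨ normalize_quality_flag f = "bad" ∨
    normalize_quality_flag f = "suspect" ∨ normalize_quality_flag f = "good" := by
  unfold normalize_quality_flag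
  generalize PySem.Str.lower (PySem.Str.strip (if f == "" then "" else f)) = t
  by_cases h1 : (t == "") = true
  · simp [h1]
  · by_cases h2 : t ∈ untrustedSensorFlags
    · simp [h1, h2]
    · by_cases h3 : t ∈ suspectSensorFlags <;> simp [h1, h2, h3]

-- the fold's body is a max
theorem fold_body_max (b r : Int) : (if r > b then r else b) = max b r := by
  simp [max_def]; omega

-- pull the accumulator out of B's fold
theorem foldl_max_acc (l : List String) (a b : Int) :
    l.foldl (fun best f => max best (rank_of f)) (max a b)
      = max a (l.foldl (fun best f => max best (rank_of f)) b) := by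
  induction l generalizing b with
  | nil => simp
  | cons h t ih => simp only [List.foldl_cons, max_assoc]; exact ih _

-- B's final rank, characterised by A's three membership tests
theorem rank_char (l : List String) :
    l.foldl (fun best f => max best (rank_of f)) 0
      = if (l.map normalize_quality_flag).contains "bad" then 3
        else if (l.map normalize_quality_flag).contains "suspect" then 2
        else if (l.map normalize_quality_flag).contains "missing" then 1
        else (0 : Int) := by
  induction l with
  | nil => simp
  | cons f t ih =>
      have step : (f :: t).foldl (fun best g => max best (rank_of g)) 0
          = max (rank_of f) (t.foldl (fun best g => max best (rank_of g)) 0) := by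
        simp only [List.foldl_cons]
        rw [show max 0 (rank_of f) = max (rank_of f) 0 from max_comm _ _]
        exact foldl_max_acc t _ 0
      rw [step, ih]
      rcases normalize_cases f with h | h | h | h <;>
        simp only [rank_of_eq_normalize f, h, List.map_cons, List.contains_cons,
          String.reduceBEq, String.reduceEq, beq_self_eq_true, reduceIte,
          Bool.false_or, Bool.true_or, if_true, if_false] <;>
        split_ifs <;> omega

-- ===== VERDICT (by name: the statement is the Claim_ definition above) =====
theorem collapse_quality_flags_py_spec : Claim_equal_collapse_quality_flags_py := by
  intro flags _
  unfold Spec_collapse_quality_flags_py collapse_quality_flags_py collapse_quality_flags_py_alt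
  simp only [fold_body_max]
  rw [rank_char]
  unfold label_of
  by_cases hb : (flags.map normalize_quality_flag).contains "bad" = true
  all_goals by_cases hs : (flags.map normalize_quality_flag).contains "suspect" = true
  all_goals by_cases hm : (flags.map normalize_quality_flag).contains "missing" = true
  all_goals simp only [hb, hs, hm, Bool.not_eq_true] at *
  all_goals simp only [hb, hs, hm, if_true, if_false, Bool.false_eq_true]
  all_goals rfl
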